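-- pv_equiv track=rewrite | github.com/aidowu1/Clustering-Models | ClusteringDocuments/Utilities.py | createClusterLabelMap
-- ===== SOURCE A (Python) =====
-- def createClusterLabelMap(train_dataset_y, target_names):
--   d = {}
--   for v in target_names:
--     for k in train_dataset_y:
--       if k not in d:
--         d[k] = v
--         break
--   return d
-- ===== SOURCE B (Python) =====
-- def createClusterLabelMap(train_dataset_y, target_names):
--     # labels in order of first appearance, paired with target names; zip truncates
--     return dict(zip(dict.fromkeys(train_dataset_y), target_names))
-- ===== Notes on version B (the rewrite author's own statement) =====
-- stated objective: faster
-- what changed: A's nested loop (for each target name, rescan the labels for the first key not yet in the dict) is replaced by one ordered dedup of the labels (dict.fromkeys) zipped with the target names, with zip's truncation handling the length mismatch.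
import Mathlib
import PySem

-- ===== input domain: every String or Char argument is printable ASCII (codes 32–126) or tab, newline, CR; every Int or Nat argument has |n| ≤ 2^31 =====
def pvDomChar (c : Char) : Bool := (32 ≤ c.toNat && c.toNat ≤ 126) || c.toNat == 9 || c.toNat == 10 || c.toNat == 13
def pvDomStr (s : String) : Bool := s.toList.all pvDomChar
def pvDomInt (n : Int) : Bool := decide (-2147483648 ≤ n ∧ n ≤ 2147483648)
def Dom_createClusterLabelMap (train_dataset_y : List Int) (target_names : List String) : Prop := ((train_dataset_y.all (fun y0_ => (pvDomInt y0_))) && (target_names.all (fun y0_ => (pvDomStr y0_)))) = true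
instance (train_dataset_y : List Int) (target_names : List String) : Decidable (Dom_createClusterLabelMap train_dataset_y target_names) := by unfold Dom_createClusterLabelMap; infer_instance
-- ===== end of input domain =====

-- B replaces A's nested "for each target name, rescan for the first unseen label" loop by a
-- single ordered dedup of the labels zipped with the target names (objective: simpler).

-- ===== PORT A =====
-- inner 'for k in train_dataset_y: if k not in d: … break' = first k of ys not a key of d
def pvFindNew (d : PySem.Dict Int String) : List Int → Option Int
  | [] => none
  | k :: ks => if d.contains k then pvFindNew d ks else some k

def createClusterLabelMap (train_dataset_y : List Int) (target_names : List String) : List (Int × String) :=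
  (target_names.foldl
    (fun d v =>
      match pvFindNew d train_dataset_y with
      | some k => d.insert k v
      | none => d)
    PySem.Dict.empty).items

-- ===== PORT B =====
def createClusterLabelMap_alt (train_dataset_y : List Int) (target_names : List String) : List (Int × String) :=
  (PySem.Dict.ofList ((PySem.List.dedup train_dataset_y).zip target_names)).items

-- ===== PRECONDITION & SPEC =====
def Spec_createClusterLabelMap (train_dataset_y : List Int) (target_names : List String) (out : List (Int × String)) : Prop := out = createClusterLabelMap_alt train_dataset_y target_names
instance (train_dataset_y : List Int) (target_names : List String) (out : List (Int × String)) : Decidable (Spec_createClusterLabelMap train_dataset_y target_names out) := by unfold Spec_createClusterLabelMap; infer_instance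

-- ===== CLAIM (what is proved, stated in full; the proofs are below) =====
def Claim_equal_createClusterLabelMap : Prop := ∀ (train_dataset_y : List Int) (target_names : List String), Dom_createClusterLabelMap train_dataset_y target_names → Spec_createClusterLabelMap train_dataset_y target_names (createClusterLabelMap train_dataset_y target_names)

-- ===== LEMMAS AND PROOFS =====

-- the labels dedup, relative to an already-seen list (membership is all that matters)
def pvAux (acc : List Int) : List Int → List Int
  | [] => []
  | k :: ks => if k ∈ acc then pvAux acc ks else k :: pvAux (acc ++ [k]) ks

theorem pvAux_eq_foldl_add (ys : List Int) : ∀ acc : List Int,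
    ys.foldl PySem.Set.add acc = acc ++ pvAux acc ys := by
  induction ys with
  | nil => intro acc; simp [pvAux]
  | cons k ks ih =>
    intro acc
    by_cases h : k ∈ acc <;>
      simp [pvAux, h, PySem.Set.add, ih, List.append_assoc]

theorem pvAux_head_not_mem : ∀ (ys acc : List Int) {k : Int} {rest : List Int},
    pvAux acc ys = k :: rest → k ∉ acc := by
  intro ys
  induction ys with
  | nil => intro acc k rest h; simp [pvAux] at h
  | cons y ys ih =>
    intro acc k rest h
    by_cases hy : y ∈ acc
    · simp [pvAux, hy] at h; exact ih acc h
    · simp [pvAux, hy] at h; rw [← h.1]; exact hy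

theorem pvAux_tail : ∀ (ys acc : List Int) {k : Int} {rest : List Int},
    pvAux acc ys = k :: rest → pvAux (acc ++ [k]) ys = rest := by
  intro ys
  induction ys with
  | nil => intro acc k rest h; simp [pvAux] at h
  | cons y ys ih =>
    intro acc k rest h
    by_cases hy : y ∈ acc
    · simp only [pvAux, if_pos hy] at h
      have : y ∈ acc ++ [k] := List.mem_append_left _ hy
      simp only [pvAux, if_pos this]
      exact ih acc h
    · simp only [pvAux, if_neg hy] at h
      obtain ⟨hk, hrest⟩ := List.cons.injEq .. ▸ h
      subst hk
      have : y ∈ acc ++ [y] := by simp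
      simp only [pvAux, if_pos this]
      exact hrest

theorem pvFindNew_eq_head (ys : List Int) : ∀ (d : PySem.Dict Int String) (acc : List Int),
    (∀ x, d.contains x = true ↔ x ∈ acc) →
    pvFindNew d ys = (pvAux acc ys).head? := by
  induction ys with
  | nil => intro d acc _; simp [pvFindNew, pvAux]
  | cons k ks ih =>
    intro d acc hc
    by_cases h : k ∈ acc
    · have : d.contains k = true := (hc k).mpr h
      simp [pvFindNew, pvAux, this, h, ih d acc hc]
    · have : d.contains k = false := by
        cases hck : d.contains k
        · rfl
        · exact absurd ((hc k).mp hck) h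
      simp [pvFindNew, pvAux, this, h]

theorem loopA_items (ys : List Int) : ∀ (ns : List String) (d : PySem.Dict Int String) (acc : List Int),
    d.keys.Nodup →
    (∀ x, d.contains x = true ↔ x ∈ acc) →
    (ns.foldl
      (fun d v =>
        match pvFindNew d ys with
        | some k => d.insert k v
        | none => d) d).items = d.items ++ (pvAux acc ys).zip ns := by
  intro ns
  induction ns with
  | nil => intro d acc _ _; simp
  | cons v ns ih =>
    intro d acc hnd hc
    rw [List.foldl_cons]
    rw [pvFindNew_eq_head ys d acc hc]
    cases haux : pvAux acc ys with
    | nil =>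
      simp only [List.head?_nil]
      have := ih d acc hnd hc
      rw [haux] at this
      simpa using this
    | cons k rest =>
      simp only [List.head?_cons]
      have hknacc : k ∉ acc := pvAux_head_not_mem ys acc haux
      have hkfree : d.contains k = false := by
        cases hck : d.contains k
        · rfl
        · exact absurd ((hc k).mp hck) hknacc
      have hc' : ∀ x, (d.insert k v).contains x = true ↔ x ∈ acc ++ [k] := by
        intro x
        rw [PySem.Dict.contains_insert]
        simp [hc x, or_comm]
      have := ih (d.insert k v) (acc ++ [k]) (PySem.Dict.nodup_keys_insert d k v hnd) hc'
      rw [pvAux_tail ys acc haux] at this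
      rw [this, PySem.Dict.items_insert_of_not_contains d v hkfree]
      simp [List.zip]

-- B side: dict() of a nodup-keyed pair list keeps exactly those pairs
theorem pvMap_fst_zip_take (l : List Int) (l' : List String) :
    List.map Prod.fst (l.zip l') = l.take l'.length := by
  induction l generalizing l' with
  | nil => simp
  | cons x xs ih => cases l' <;> simp [ih]

theorem pvContains_empty_int (x : Int) : (PySem.Dict.empty : PySem.Dict Int String).contains x = true ↔ x ∈ ([] : List Int) := by
  simp [PySem.Dict.contains_empty]

-- ===== VERDICT (by name: the statement is the Claim_ definition above) =====
theorem createClusterLabelMap_spec : Claim_equal_createClusterLabelMap := by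
  intro ys ns _
  unfold Spec_createClusterLabelMap createClusterLabelMap createClusterLabelMap_alt
  rw [loopA_items ys ns PySem.Dict.empty [] (by simp) pvContains_empty_int]
  have hded : pvAux [] ys = PySem.List.dedup ys := by
    have := pvAux_eq_foldl_add ys []
    simp at this
    rw [← this]
    rfl
  rw [hded]
  show _ = (List.foldl (fun d p => d.insert p.1 p.2) PySem.Dict.empty ((PySem.List.dedup ys).zip ns)).items
  rw [PySem.Dict.items_foldl_insert_fresh ((PySem.List.dedup ys).zip ns) Prod.fst Prod.snd PySem.Dict.empty
        (fun a _ => PySem.Dict.contains_empty a.1)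
        (by
          rw [pvMap_fst_zip_take]
          exact (List.take_sublist _ _).nodup (PySem.List.nodup_dedup ys))]
  simp
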